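-- pv_equiv track=rewrite | github.com/pypi-data/pypi-mirror-389 | packages/streamfuels/streamfuels-0.1.3-py3-none-any.whl/streamfuels/datasets/auxiliary_functions.py | find_last_sequence
-- ===== SOURCE A (Python) =====
-- def find_last_sequence(arr):
--     """
--     Find the last sequence of consecutive elements in the given array.
--
--     Args:
--         arr (list): The input list of integers.
--
--     Returns:
--         list: The list containing the last sequence of consecutive elements.
--     """
--     if not arr:
--         return []  # Return an empty list if the input array is empty
--
--     sequence = [arr[-1]]  # Start with the last element
--     for i in range(len(arr) - 2, -1, -1):
--         # If the current element is consecutive with the next one, add it to the sequence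
--         if arr[i] == sequence[-1] - 1:
--             sequence.append(arr[i])
--         else:
--             break  # Break the loop when the sequence breaks
--     sequence.reverse()  # Reverse the sequence to have it in ascending order
--     return sequence
-- ===== SOURCE B (Python) =====
-- def find_last_sequence(arr):
--     if not arr:
--         return []
--     start = len(arr) - 1
--     while start > 0 and arr[start - 1] == arr[start] - 1:
--         start -= 1
--     return arr[start:]
-- ===== Notes on version B (the rewrite author's own statement) =====
-- stated objective: simpler
-- what changed: B finds the start index of the final consecutive run with a while loop and returns a single slice arr[start:], instead of accumulating the run element-by-element into a reversed list and reversing it at the end.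
import Mathlib
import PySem

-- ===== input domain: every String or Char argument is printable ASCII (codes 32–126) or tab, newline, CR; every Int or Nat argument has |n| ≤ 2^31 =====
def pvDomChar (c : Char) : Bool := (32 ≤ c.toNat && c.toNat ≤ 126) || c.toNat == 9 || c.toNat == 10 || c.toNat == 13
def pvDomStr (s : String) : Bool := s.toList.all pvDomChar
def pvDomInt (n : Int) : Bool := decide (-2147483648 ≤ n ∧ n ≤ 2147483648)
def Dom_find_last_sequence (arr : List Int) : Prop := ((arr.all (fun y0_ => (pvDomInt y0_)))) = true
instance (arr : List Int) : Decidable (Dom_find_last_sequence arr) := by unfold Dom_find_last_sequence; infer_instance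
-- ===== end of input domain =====

-- B finds the start index of the last consecutive run and returns one slice,
-- instead of accumulating the run in reverse and reversing it (objective: simpler).


-- ===== PORT A =====
-- loop 'for i in range(len(arr)-2, -1, -1): …' with break: fuel n means indices n-1 … 0 remain;
-- sequence is kept in Python order (appends via ++ [·], sequence[-1] = getLastD).
def aLoop (arr : List Int) : Nat → List Int → List Int
  | 0, seq => seq
  | n + 1, seq =>
    if arr.getD n 0 = seq.getLastD 0 - 1 then aLoop arr n (seq ++ [arr.getD n 0])
    else seq

def find_last_sequence (arr : List Int) : List Int :=
  match arr with
  | [] => []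
  | _ => (aLoop arr (arr.length - 1) [arr.getLastD 0]).reverse

-- ===== PORT B =====
-- 'start = len(arr)-1; while start > 0 and arr[start-1] == arr[start] - 1: start -= 1'
def bStart (arr : List Int) : Nat → Nat
  | 0 => 0
  | s + 1 => if arr.getD s 0 = arr.getD (s + 1) 0 - 1 then bStart arr s else s + 1

def find_last_sequence_alt (arr : List Int) : List Int :=
  if arr.isEmpty then []
  else arr.drop (bStart arr (arr.length - 1))

-- ===== PRECONDITION & SPEC =====
def Spec_find_last_sequence (arr : List Int) (out : List Int) : Prop := out = find_last_sequence_alt arr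
instance (arr : List Int) (out : List Int) : Decidable (Spec_find_last_sequence arr out) := by unfold Spec_find_last_sequence; infer_instance

-- ===== CLAIM (what is proved, stated in full; the proofs are below) =====
def Claim_equal_find_last_sequence : Prop := ∀ (arr : List Int), Dom_find_last_sequence arr → Spec_find_last_sequence arr (find_last_sequence arr)

-- ===== LEMMAS AND PROOFS =====

theorem drop_eq_getD_cons (arr : List Int) (n : Nat) (h : n < arr.length) :
    arr.drop n = arr.getD n 0 :: arr.drop (n + 1) := by
  rw [List.getD_eq_getElem _ _ h]
  exact (List.drop_eq_getElem_cons h)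

theorem aLoop_drop (arr : List Int) (n : Nat) (h : n < arr.length) :
    aLoop arr n ((arr.drop n).reverse) = (arr.drop (bStart arr n)).reverse := by
  induction n with
  | zero => simp [aLoop, bStart]
  | succ m ih =>
    have hm : m < arr.length := Nat.lt_of_succ_lt h
    have hd : (arr.drop (m + 1)).reverse.getLastD 0 = arr.getD (m + 1) 0 := by
      rcases Nat.lt_or_ge (m + 1) arr.length with h1 | h1
      · rw [drop_eq_getD_cons arr (m + 1) h1]; simp
      · simp [List.drop_eq_nil_of_le h1, List.getD_eq_getElem?_getD,
          List.getElem?_eq_none (by omega : arr.length ≤ m + 1)]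
    rw [aLoop, bStart, hd]
    split
    · rw [← List.reverse_cons, ← drop_eq_getD_cons arr m hm]
      exact ih hm
    · rfl

theorem list_reverse_reverse (l : List Int) : l.reverse.reverse = l := List.reverse_reverse l

-- ===== VERDICT (by name: the statement is the Claim_ definition above) =====
theorem find_last_sequence_spec : Claim_equal_find_last_sequence := by
  intro arr _
  show find_last_sequence arr = find_last_sequence_alt arr
  cases arr with
  | nil => rfl
  | cons x xs =>
    rw [show find_last_sequence_alt (x :: xs)
        = (x :: xs).drop (bStart (x :: xs) ((x :: xs).length - 1)) from rfl]
    have hlen : (x :: xs).length - 1 < (x :: xs).length := by simp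
    have hinit : ((x :: xs).drop ((x :: xs).length - 1)).reverse
        = [(x :: xs).getLastD 0] := by
      rw [drop_eq_getD_cons _ _ hlen]
      have : (x :: xs).drop ((x :: xs).length - 1 + 1) = [] := by
        apply List.drop_eq_nil_of_le; simp
      rw [this]
      simp [List.getLastD_eq_getLast?, List.getLast?_eq_getElem?,
        List.getD_eq_getElem?_getD]
    show ((aLoop (x :: xs) ((x :: xs).length - 1) [(x :: xs).getLastD 0]).reverse)
        = (x :: xs).drop (bStart (x :: xs) ((x :: xs).length - 1))
    rw [← hinit, aLoop_drop _ _ hlen, list_reverse_reverse]
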